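-- pv_equiv track=rewrite | github.com/ibraich/api | app/services/document_recommendation_service.py | no_overlapping_or_duplicate_tokens
-- ===== SOURCE A (Python) =====
-- def no_overlapping_or_duplicate_tokens(tokens):
--
--     # Sort tokens by their start index
--     sorted_tokens = sorted(tokens, key=lambda x: x["startTokenDocumentIndex"])
--
--     # Check for tokens with the same start and end index
--     for token in sorted_tokens:
--         if token["startTokenDocumentIndex"] > token["endTokenDocumentIndex"]:
--             return False  # Token with higher start than end index found
--
--     # Iterate through the sorted tokens and check for overlaps
--     for i in range(len(sorted_tokens) - 1):
--         current_token = sorted_tokens[i]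
--         next_token = sorted_tokens[i + 1]
--
--         # Check if the current token overlaps with the next token
--         if (
--             current_token["endTokenDocumentIndex"]
--             >= next_token["startTokenDocumentIndex"]
--         ):
--             return False  # Overlap found
--
--     return True  # No overlaps or duplicate tokens found
-- ===== SOURCE B (Python) =====
-- def no_overlapping_or_duplicate_tokens(tokens):
--     # Reject any token whose start index exceeds its end index
--     for t in tokens:
--         if t["startTokenDocumentIndex"] > t["endTokenDocumentIndex"]:
--             return False
--     # All-pairs scan: any two tokens whose inclusive ranges touch or overlap
--     n = len(tokens)
--     for i in range(n):
--         si = tokens[i]["startTokenDocumentIndex"]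
--         ei = tokens[i]["endTokenDocumentIndex"]
--         for j in range(i + 1, n):
--             sj = tokens[j]["startTokenDocumentIndex"]
--             ej = tokens[j]["endTokenDocumentIndex"]
--             if si <= ej and sj <= ei:
--                 return False
--     return True
-- ===== Notes on version B (the rewrite author's own statement) =====
-- stated objective: alternative
-- what changed: Replaces A's sort-then-check-adjacent-pairs strategy with a sort-free validity pass followed by an all-pairs inclusive-overlap scan over index pairs i<j.
import Mathlib
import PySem

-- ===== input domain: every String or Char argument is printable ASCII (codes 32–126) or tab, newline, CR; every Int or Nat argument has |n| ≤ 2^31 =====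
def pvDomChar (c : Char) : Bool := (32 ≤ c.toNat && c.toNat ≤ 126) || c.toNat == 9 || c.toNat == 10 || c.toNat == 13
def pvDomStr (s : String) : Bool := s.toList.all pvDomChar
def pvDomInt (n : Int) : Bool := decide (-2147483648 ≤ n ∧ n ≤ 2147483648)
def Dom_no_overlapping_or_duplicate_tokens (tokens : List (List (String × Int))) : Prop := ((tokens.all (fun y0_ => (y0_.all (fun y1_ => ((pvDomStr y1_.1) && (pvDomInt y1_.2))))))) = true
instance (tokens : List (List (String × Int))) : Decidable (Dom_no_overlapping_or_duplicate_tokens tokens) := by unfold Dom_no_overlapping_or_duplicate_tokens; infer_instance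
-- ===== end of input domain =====

-- B replaces A's sort-then-check-adjacent with a validity pass plus an all-pairs inclusive-overlap scan (alternative decomposition, no sort).


-- token["startTokenDocumentIndex"] / token["endTokenDocumentIndex"]: first-match lookup;
-- the default 0 is never reached under Pre_ (both keys present).
def pvStart (t : List (String × Int)) : Int := (List.lookup "startTokenDocumentIndex" t).getD 0
def pvEnd (t : List (String × Int)) : Int := (List.lookup "endTokenDocumentIndex" t).getD 0

-- ===== PORT A =====
-- the second loop of A: check each adjacent pair of the sorted list, early return False
def pvChkAdj : List (List (String × Int)) → Bool
  | a :: b :: rest => if pvEnd a ≥ pvStart b then false else pvChkAdj (b :: rest)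
  | _ => true

def no_overlapping_or_duplicate_tokens (tokens : List (List (String × Int))) : Bool :=
  let sorted_tokens := PySem.List.sorted tokens (fun t => pvStart t)
  if sorted_tokens.any (fun t => pvStart t > pvEnd t) then false
  else pvChkAdj sorted_tokens

-- ===== PORT B =====
-- inner loop of B: does token a overlap (inclusively) any token of rest?
def pvNoPairWith (a : List (String × Int)) (rest : List (List (String × Int))) : Bool :=
  rest.all (fun b => !(pvStart a ≤ pvEnd b && pvStart b ≤ pvEnd a))

-- outer all-pairs loop of B (i, then j > i)
def pvPairsOk : List (List (String × Int)) → Bool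
  | [] => true
  | a :: rest => pvNoPairWith a rest && pvPairsOk rest

def no_overlapping_or_duplicate_tokens_alt (tokens : List (List (String × Int))) : Bool :=
  tokens.all (fun t => !(pvStart t > pvEnd t)) && pvPairsOk tokens

-- ===== PRECONDITION & SPEC =====
-- Pre_ excludes inputs where a token is missing one of the two keys, on which Python A
-- normally raises KeyError; when an invalid (start>end) token shadows the missing key,
-- both programs early-return the same False there anyway.
def Pre_no_overlapping_or_duplicate_tokens (tokens : List (List (String × Int))) : Prop :=
  ∀ t ∈ tokens, (List.lookup "startTokenDocumentIndex" t).isSome ∧ (List.lookup "endTokenDocumentIndex" t).isSome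
instance (tokens : List (List (String × Int))) : Decidable (Pre_no_overlapping_or_duplicate_tokens tokens) := by unfold Pre_no_overlapping_or_duplicate_tokens; infer_instance

def pvWitness_no_overlapping_or_duplicate_tokens : (List (List (String × Int))) :=
  [[("startTokenDocumentIndex", 0), ("endTokenDocumentIndex", 1)],
   [("startTokenDocumentIndex", 3), ("endTokenDocumentIndex", 4)]]

def Spec_no_overlapping_or_duplicate_tokens (tokens : List (List (String × Int))) (out : Bool) : Prop := out = no_overlapping_or_duplicate_tokens_alt tokens
instance (tokens : List (List (String × Int))) (out : Bool) : Decidable (Spec_no_overlapping_or_duplicate_tokens tokens out) := by unfold Spec_no_overlapping_or_duplicate_tokens; infer_instance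

-- ===== CLAIM (what is proved, stated in full; the proofs are below) =====
def Claim_equal_no_overlapping_or_duplicate_tokens : Prop := ∀ (tokens : List (List (String × Int))), Dom_no_overlapping_or_duplicate_tokens tokens → Pre_no_overlapping_or_duplicate_tokens tokens → Spec_no_overlapping_or_duplicate_tokens tokens (no_overlapping_or_duplicate_tokens tokens)

-- ===== LEMMAS AND PROOFS =====

-- B's all-pairs loop is exactly a Pairwise check
theorem pvPairsOk_iff (l : List (List (String × Int))) :
    pvPairsOk l = true ↔ l.Pairwise (fun a b => ¬(pvStart a ≤ pvEnd b ∧ pvStart b ≤ pvEnd a)) := by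
  induction l with
  | nil => simp [pvPairsOk]
  | cons a rest ih =>
    simp only [pvPairsOk, Bool.and_eq_true, ih, List.pairwise_cons, pvNoPairWith, List.all_eq_true]
    refine and_congr (forall₂_congr fun b hb => ?_) Iff.rfl
    simp only [Bool.not_eq_eq_eq_not, Bool.not_true, Bool.and_eq_false_iff, decide_eq_false_iff_not]
    tauto

-- on a start-sorted list of valid intervals, the adjacent check decides pairwise disjointness
theorem pvChkAdj_iff (l : List (List (String × Int)))
    (hsort : l.Pairwise (fun a b => pvStart a ≤ pvStart b))
    (hval : ∀ t ∈ l, pvStart t ≤ pvEnd t) :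
    pvChkAdj l = true ↔ l.Pairwise (fun a b => ¬(pvStart a ≤ pvEnd b ∧ pvStart b ≤ pvEnd a)) := by
  induction l with
  | nil => simp [pvChkAdj]
  | cons a rest ih =>
    cases rest with
    | nil => simp [pvChkAdj]
    | cons b rest' =>
      have hsort' : (b :: rest').Pairwise (fun a b => pvStart a ≤ pvStart b) := hsort.of_cons
      have hval' : ∀ t ∈ b :: rest', pvStart t ≤ pvEnd t := fun t ht => hval t (List.mem_cons_of_mem a ht)
      have hab : pvStart a ≤ pvStart b := (List.pairwise_cons.mp hsort).1 b (List.mem_cons_self ..)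
      have ihbc := ih hsort' hval'
      by_cases hov : pvEnd a ≥ pvStart b
      · have : pvChkAdj (a :: b :: rest') = false := by simp [pvChkAdj, hov]
        rw [this]
        constructor
        · intro h; exact absurd h (by simp)
        · intro h
          have := (List.pairwise_cons.mp h).1 b (List.mem_cons_self ..)
          exact absurd ⟨le_trans hab (hval' b (List.mem_cons_self ..)), hov⟩ this
      · push Not at hov
        have hstep : pvChkAdj (a :: b :: rest') = pvChkAdj (b :: rest') := by
          simp [pvChkAdj]; omega
        rw [hstep, ihbc]
        constructor
        · intro h
          refine List.pairwise_cons.mpr ⟨fun c hc => ?_, h⟩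
          have hbc : pvStart b ≤ pvStart c := by
            rcases List.mem_cons.mp hc with rfl | hc'
            · exact le_refl _
            · exact (List.pairwise_cons.mp hsort').1 c hc'
          intro ⟨_, hca⟩; omega
        · exact List.Pairwise.of_cons

theorem no_overlapping_or_duplicate_tokens_spec : Claim_equal_no_overlapping_or_duplicate_tokens := by
  intro tokens _ _
  unfold Spec_no_overlapping_or_duplicate_tokens
  unfold no_overlapping_or_duplicate_tokens no_overlapping_or_duplicate_tokens_alt
  have hperm := PySem.List.sorted_perm tokens (fun t => pvStart t) false
  by_cases hbad : ∃ t ∈ tokens, pvStart t > pvEnd t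
  · obtain ⟨t, ht, hgt⟩ := hbad
    have h1 : (PySem.List.sorted tokens (fun t => pvStart t)).any (fun t => pvStart t > pvEnd t) = true := by
      simp only [List.any_eq_true]
      exact ⟨t, (hperm.mem_iff).mpr ht, by simp [hgt]⟩
    have h2 : tokens.all (fun t => !(pvStart t > pvEnd t)) = false := by
      simp only [List.all_eq_false]
      exact ⟨t, ht, by simp [hgt]⟩
    simp [h1, h2]
  · push Not at hbad
    have hval : ∀ t ∈ PySem.List.sorted tokens (fun t => pvStart t), pvStart t ≤ pvEnd t :=
      fun t ht => hbad t (hperm.mem_iff.mp ht)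
    have h1 : (PySem.List.sorted tokens (fun t => pvStart t)).any (fun t => pvStart t > pvEnd t) = false := by
      simp only [List.any_eq_false]
      intro t ht; have := hval t ht; simp; omega
    have h2 : tokens.all (fun t => !(pvStart t > pvEnd t)) = true := by
      simp only [List.all_eq_true]
      intro t ht; simp [not_lt]; exact hbad t ht
    have hiff := pvChkAdj_iff (PySem.List.sorted tokens (fun t => pvStart t))
      (PySem.List.sorted_pairwise tokens (fun t => pvStart t)) hval
    have hsym : ∀ {x y : List (String × Int)},
        (¬(pvStart x ≤ pvEnd y ∧ pvStart y ≤ pvEnd x)) → ¬(pvStart y ≤ pvEnd x ∧ pvStart x ≤ pvEnd y) := by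
      intro x y h ⟨h1, h2⟩; exact h ⟨h2, h1⟩
    have hpw := List.Perm.pairwise_iff (R := fun a b => ¬(pvStart a ≤ pvEnd b ∧ pvStart b ≤ pvEnd a)) (fun h => hsym h) hperm
    have : pvChkAdj (PySem.List.sorted tokens (fun t => pvStart t)) = pvPairsOk tokens := by
      rw [Bool.eq_iff_iff, hiff, pvPairsOk_iff]
      exact hpw
    simp [h1, h2, this]
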